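-- pv_equiv track=rewrite | github.com/fabiotheo/ipcom-marketing-ai | src/osp_marketing_tools/quality_assurance.py | _are_semantically_similar
-- ===== SOURCE A (Python) =====
-- def _are_semantically_similar(word1: str, word2: str) -> bool:
--     """Check if two words are semantically similar."""
--     # Simple stem matching
--     if len(word1) >= 4 and len(word2) >= 4:
--         if word1[:4] == word2[:4]:  # Same 4-letter prefix
--             return True
--
--     # Common business term relationships
--     related_terms = {
--         "cost": ["expense", "budget", "price", "money"],
--         "time": ["duration", "timeline", "schedule", "speed"],
--         "improve": ["enhance", "optimize", "better", "increase"],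
--         "problem": ["issue", "challenge", "concern", "difficulty"],
--         "solution": ["tool", "system", "platform", "product"],
--     }
--
--     for base_term, related in related_terms.items():
--         if (word1 == base_term and word2 in related) or (
--             word2 == base_term and word1 in related
--         ):
--             return True
--
--     return False
-- ===== SOURCE B (Python) =====
-- _RELATED_TERMS = {
--     "cost": ["expense", "budget", "price", "money"],
--     "time": ["duration", "timeline", "schedule", "speed"],
--     "improve": ["enhance", "optimize", "better", "increase"],
--     "problem": ["issue", "challenge", "concern", "difficulty"],
--     "solution": ["tool", "system", "platform", "product"],
-- }
--
-- # Every relationship stored once, as a canonical (sorted) pair.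
-- _PAIR_INDEX = frozenset(
--     tuple(sorted((base, r))) for base, rel in _RELATED_TERMS.items() for r in rel
-- )
--
--
-- def _are_semantically_similar(word1: str, word2: str) -> bool:
--     """Check if two words are semantically similar."""
--     if len(word1) >= 4 and word2.startswith(word1[:4]):
--         return True
--     return tuple(sorted((word1, word2))) in _PAIR_INDEX
-- ===== Notes on version B (the rewrite author's own statement) =====
-- stated objective: simpler
-- what changed: B canonicalizes the unordered word pair by sorting it and performs one lookup in a half-sized index of canonical (sorted) pairs, instead of A's scan over the base-to-relatives table with two directional tests per entry; the prefix test becomes a single startswith on word1's 4-char stem.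
import Mathlib
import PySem

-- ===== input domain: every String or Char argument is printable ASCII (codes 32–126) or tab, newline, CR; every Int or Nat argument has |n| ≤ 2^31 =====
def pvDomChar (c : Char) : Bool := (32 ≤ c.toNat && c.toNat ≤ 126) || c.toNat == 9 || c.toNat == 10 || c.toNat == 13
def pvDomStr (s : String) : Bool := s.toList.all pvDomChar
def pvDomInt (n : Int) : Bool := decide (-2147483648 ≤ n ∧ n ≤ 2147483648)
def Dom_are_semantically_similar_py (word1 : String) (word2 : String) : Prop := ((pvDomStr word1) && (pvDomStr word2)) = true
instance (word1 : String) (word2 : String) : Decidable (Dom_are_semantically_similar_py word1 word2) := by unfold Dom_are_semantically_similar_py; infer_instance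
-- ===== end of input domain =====

-- B canonicalizes the unordered pair (sorted) and does one lookup in a half-sized index of
-- canonical pairs instead of A's table scan with two directional tests (simpler; same result).

-- ===== PORT A =====
def pvRelatedTerms : List (String × List String) :=
  [("cost", ["expense", "budget", "price", "money"]),
   ("time", ["duration", "timeline", "schedule", "speed"]),
   ("improve", ["enhance", "optimize", "better", "increase"]),
   ("problem", ["issue", "challenge", "concern", "difficulty"]),
   ("solution", ["tool", "system", "platform", "product"])]

-- the for-loop with early return
def pvALoop (word1 word2 : String) : List (String × List String) → Bool
  | [] => false
  | (base, related) :: rest =>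
    if (word1 == base && related.contains word2) || (word2 == base && related.contains word1) then
      true
    else pvALoop word1 word2 rest

def are_semantically_similar_py (word1 : String) (word2 : String) : Bool :=
  if 4 ≤ PySem.Str.len word1 && 4 ≤ PySem.Str.len word2 then
    if PySem.List.slice word1.toList none (some 4) == PySem.List.slice word2.toList none (some 4) then
      true
    else pvALoop word1 word2 pvRelatedTerms
  else pvALoop word1 word2 pvRelatedTerms

-- ===== PORT B =====
-- tuple(sorted((a, b))) for two strings (Python's sorted swaps only when b < a)
def pvCanon (a b : String) : String × String := if b < a then (b, a) else (a, b)

-- the frozenset of canonical pairs, built once from the table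
def pvPairIndex : PySem.Set (String × String) :=
  PySem.Set.ofList (pvRelatedTerms.flatMap (fun br => br.2.map (fun r => pvCanon br.1 r)))

def are_semantically_similar_py_alt (word1 : String) (word2 : String) : Bool :=
  if 4 ≤ PySem.Str.len word1
      && PySem.Str.startswith word2 (PySem.Str.slice word1 none (some 4)) then
    true
  else pvPairIndex.contains (pvCanon word1 word2)

-- ===== PRECONDITION & SPEC =====
def Spec_are_semantically_similar_py (word1 : String) (word2 : String) (out : Bool) : Prop := out = are_semantically_similar_py_alt word1 word2
instance (word1 : String) (word2 : String) (out : Bool) : Decidable (Spec_are_semantically_similar_py word1 word2 out) := by unfold Spec_are_semantically_similar_py; infer_instance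

-- ===== CLAIM (what is proved, stated in full; the proofs are below) =====
def Claim_equal_are_semantically_similar_py : Prop := ∀ (word1 : String) (word2 : String), Dom_are_semantically_similar_py word1 word2 → Spec_are_semantically_similar_py word1 word2 (are_semantically_similar_py word1 word2)

-- ===== LEMMAS AND PROOFS =====

-- canonical pairs are equal iff the unordered pairs are equal
theorem pv_canon_eq_iff (a b x y : String) :
    pvCanon a b = pvCanon x y ↔ ((a = x ∧ b = y) ∨ (a = y ∧ b = x)) := by
  unfold pvCanon
  split_ifs with h1 h2 h2 <;> simp only [Prod.mk.injEq]
  · constructor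
    · rintro ⟨rfl, rfl⟩
      exact Or.inl ⟨rfl, rfl⟩
    · rintro (⟨rfl, rfl⟩ | ⟨rfl, rfl⟩)
      · exact ⟨rfl, rfl⟩
      · exact absurd h1 (lt_asymm h2)
  · constructor
    · rintro ⟨rfl, rfl⟩
      exact Or.inr ⟨rfl, rfl⟩
    · rintro (⟨rfl, rfl⟩ | ⟨rfl, rfl⟩)
      · exact absurd h1 h2
      · exact ⟨rfl, rfl⟩
  · constructor
    · rintro ⟨rfl, rfl⟩
      exact Or.inr ⟨rfl, rfl⟩
    · rintro (⟨rfl, rfl⟩ | ⟨rfl, rfl⟩)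
      · exact absurd h2 h1
      · exact ⟨rfl, rfl⟩
  · constructor
    · rintro ⟨rfl, rfl⟩
      exact Or.inl ⟨rfl, rfl⟩
    · rintro (⟨rfl, rfl⟩ | ⟨rfl, rfl⟩)
      · exact ⟨rfl, rfl⟩
      · exact ⟨le_antisymm (not_lt.mp h1) (not_lt.mp h2), le_antisymm (not_lt.mp h2) (not_lt.mp h1)⟩

-- one table entry: A's two directional tests = membership of the canonical pair
theorem pv_entry_block (word1 word2 base : String) (rel : List String) :
    (rel.map (fun r => pvCanon base r)).contains (pvCanon word1 word2)
      = ((word1 == base && rel.contains word2) || (word2 == base && rel.contains word1)) := by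
  induction rel with
  | nil => simp
  | cons r rs ih =>
    simp only [List.map_cons, List.contains_cons, ih]
    rw [Bool.eq_iff_iff]
    simp only [Bool.or_eq_true, Bool.and_eq_true, beq_iff_eq, List.contains_eq_mem,
      decide_eq_true_eq, pv_canon_eq_iff]
    tauto

-- A's whole loop = lookup of the canonical pair in the flattened index
theorem pv_loop_eq (word1 word2 : String) (ts : List (String × List String)) :
    pvALoop word1 word2 ts
      = (ts.flatMap (fun br => br.2.map (fun r => pvCanon br.1 r))).contains (pvCanon word1 word2) := by
  induction ts with
  | nil => simp [pvALoop]
  | cons t rest ih =>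
    obtain ⟨base, rel⟩ := t
    simp only [pvALoop, List.flatMap_cons, List.contains_append, ← ih, pv_entry_block]
    split <;> simp_all

-- the frozenset keeps exactly the flattened list's (distinct) elements
theorem pv_index_contains (p : String × String) :
    pvPairIndex.contains p
      = (pvRelatedTerms.flatMap (fun br => br.2.map (fun r => pvCanon br.1 r))).contains p := by
  unfold pvPairIndex
  rw [PySem.Set.contains_eq_listContains, List.contains_eq_mem, List.contains_eq_mem,
    decide_eq_decide]
  exact PySem.Set.mem_ofList _ _

-- prefix tests agree: word2.startswith(word1[:4]) with len(word1) ≥ 4 forces len(word2) ≥ 4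
theorem pv_slice_take (l : List Char) : PySem.List.slice l none (some 4) = l.take 4 := by
  rw [show (some (4:Int)) = some ((4:Nat):Int) from rfl, PySem.List.slice_to_natCast]

theorem pv_prefix_eq (word1 word2 : String) (h1 : 4 ≤ word1.toList.length) :
    (PySem.Str.startswith word2 (PySem.Str.slice word1 none (some 4)) : Bool)
      = (decide (4 ≤ word2.toList.length)
          && (PySem.List.slice word1.toList none (some 4) == PySem.List.slice word2.toList none (some 4))) := by
  have hs : (PySem.Str.slice word1 none (some 4)).toList = word1.toList.take 4 := by
    rw [PySem.Str.toList_slice, PySem.Chars.slice_eq_listSlice, pv_slice_take]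
  have hl : (word1.toList.take 4).length = 4 := by rw [List.length_take]; omega
  rw [Bool.eq_iff_iff]
  simp only [Bool.and_eq_true, beq_iff_eq, decide_eq_true_eq, pv_slice_take]
  rw [show (PySem.Str.startswith word2 (PySem.Str.slice word1 none (some 4)) = true)
        ↔ (PySem.Str.slice word1 none (some 4)).toList <+: word2.toList from by
      rw [PySem.Str.startswith_eq]; exact PySem.Chars.startswith_iff _ _]
  rw [hs]
  constructor
  · intro hp
    have hlen := hp.length_le
    rw [hl] at hlen
    have heq := List.prefix_iff_eq_take.mp hp
    rw [hl] at heq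
    exact ⟨hlen, heq⟩
  · rintro ⟨h2, heq⟩
    rw [List.prefix_iff_eq_take, hl]
    exact heq

theorem pv_are_sim_eq (word1 word2 : String) :
    are_semantically_similar_py word1 word2 = are_semantically_similar_py_alt word1 word2 := by
  unfold are_semantically_similar_py are_semantically_similar_py_alt
  rw [pv_index_contains, ← pv_loop_eq]
  generalize pvALoop word1 word2 pvRelatedTerms = L
  have h1' : ((4:Int) ≤ PySem.Str.len word1) ↔ (4 ≤ word1.toList.length) := by
    rw [PySem.Str.len_eq]; exact_mod_cast Iff.rfl
  have h2' : ((4:Int) ≤ PySem.Str.len word2) ↔ (4 ≤ word2.toList.length) := by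
    rw [PySem.Str.len_eq]; exact_mod_cast Iff.rfl
  rw [decide_eq_decide.mpr h1', decide_eq_decide.mpr h2']
  by_cases h1 : 4 ≤ word1.toList.length
  · rw [pv_prefix_eq word1 word2 h1, decide_eq_true h1]
    cases hb : decide (4 ≤ word2.toList.length) <;>
      cases he : (PySem.List.slice word1.toList none (some 4) == PySem.List.slice word2.toList none (some 4)) <;>
        simp
  · rw [decide_eq_false h1]
    simp

-- ===== VERDICT (by name: the statement is the Claim_ definition above) =====
theorem are_semantically_similar_py_spec : Claim_equal_are_semantically_similar_py := by
  intro word1 word2 _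
  unfold Spec_are_semantically_similar_py
  exact pv_are_sim_eq word1 word2
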